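-- pv_equiv track=rewrite | github.com/symbolic01/continuum | core/session_compress.py | _truncate_middle
-- ===== SOURCE A (Python) =====
-- def _truncate_middle(turns: list[dict], max_chars: int = 120_000) -> list[dict]:
--     """If turns exceed max_chars, keep first 15% + last 50%, drop the middle."""
--     total = sum(len(t.get("content", "")) for t in turns)
--     if total <= max_chars:
--         return turns
--
--     # Walk from start to find 15% boundary
--     head_budget = int(max_chars * 0.15)
--     head_chars = 0
--     head_end = 0
--     for i, t in enumerate(turns):
--         head_chars += len(t.get("content", ""))
--         if head_chars >= head_budget:
--             head_end = i + 1
--             break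
--
--     # Walk from end to find 50% boundary
--     tail_budget = int(max_chars * 0.50)
--     tail_chars = 0
--     tail_start = len(turns)
--     for i in range(len(turns) - 1, -1, -1):
--         tail_chars += len(turns[i].get("content", ""))
--         if tail_chars >= tail_budget:
--             tail_start = i
--             break
--
--     if tail_start <= head_end:
--         return turns  # overlap — just return all
--
--     omitted = tail_start - head_end
--     marker = {"role": "user", "content": f"[... {omitted} turns of iterative work omitted ...]"}
--     return turns[:head_end] + [marker] + turns[tail_start:]
-- ===== SOURCE B (Python) =====
-- from bisect import bisect_left, bisect_right
-- from itertools import accumulate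
--
--
-- def _truncate_middle(turns: list[dict], max_chars: int = 120_000) -> list[dict]:
--     """Prefix-sum + bisect re-implementation: same keep-head/keep-tail truncation."""
--     prefix = list(accumulate((len(t.get("content", "")) for t in turns), initial=0))
--     total = prefix[-1]
--     if total <= max_chars:
--         return turns
--
--     # head_end: first 1-based position where the running total reaches 15% budget
--     head_budget = int(max_chars * 0.15)
--     head_end = max(bisect_left(prefix, head_budget), 1) if turns else 0
--
--     # tail_start: largest index whose suffix sum reaches the 50% budget
--     tail_budget = int(max_chars * 0.50)
--     tail_start = min(bisect_right(prefix, total - tail_budget) - 1, len(turns) - 1)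
--     if tail_start < 0:
--         tail_start = len(turns)
--
--     if tail_start <= head_end:
--         return turns
--
--     omitted = tail_start - head_end
--     marker = {"role": "user", "content": f"[... {omitted} turns of iterative work omitted ...]"}
--     return turns[:head_end] + [marker] + turns[tail_start:]
-- ===== Notes on version B (the rewrite author's own statement) =====
-- stated objective: alternative
-- what changed: B builds a prefix-sum table with itertools.accumulate once and finds the head/tail cut points with bisect binary searches instead of A's two directional accumulate-and-break scans.
import Mathlib
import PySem

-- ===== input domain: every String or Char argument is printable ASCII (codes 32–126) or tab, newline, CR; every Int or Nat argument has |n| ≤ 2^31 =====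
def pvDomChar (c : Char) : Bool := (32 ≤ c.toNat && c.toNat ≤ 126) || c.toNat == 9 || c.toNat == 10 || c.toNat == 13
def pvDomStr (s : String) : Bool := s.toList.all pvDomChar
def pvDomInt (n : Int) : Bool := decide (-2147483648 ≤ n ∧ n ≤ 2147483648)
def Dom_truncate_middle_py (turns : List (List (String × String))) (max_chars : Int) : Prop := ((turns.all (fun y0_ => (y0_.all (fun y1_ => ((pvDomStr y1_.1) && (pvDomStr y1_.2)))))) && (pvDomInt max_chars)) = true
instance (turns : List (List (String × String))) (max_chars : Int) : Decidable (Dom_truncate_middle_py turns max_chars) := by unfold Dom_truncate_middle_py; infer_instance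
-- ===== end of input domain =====

-- B replaces A's two break-on-threshold scans by a prefix-sum table searched with binary search (bisect); same return value, alternative structure.

-- ===== PORT A =====
-- t.get("content", ""): Python dict.get = first-match lookup in the association list
def pvContent (t : List (String × String)) : String :=
  (((t.find? (fun kv => kv.1 == "content")).map (fun kv => kv.2)).getD "")

def pvLen (t : List (String × String)) : Int := PySem.Str.len (pvContent t)

-- Exact integer model of Python's float expression int(n * 0.15), shared by both ports
-- (both Pythons contain this very expression).  0.15 as an IEEE double is
-- 5404319552844595 / 2^55; n*0.15 is the round-to-nearest-even double of
-- n*5404319552844595 / 2^55, and int() truncates toward zero.  Exact for |n| ≤ 2^31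
-- (the product then stays far from double overflow and its ulp is < 1).
def nat015 (a : Nat) : Nat :=
  let x := a * 5404319552844595
  let L := Nat.log2 x
  let k := L - 52
  let q := x / 2 ^ k
  let q' := if 2 ^ k < 2 * (x % 2 ^ k) ∨ (2 * (x % 2 ^ k) = 2 ^ k ∧ q % 2 = 1) then q + 1 else q
  q' / 2 ^ (107 - L)

def pyInt015 (n : Int) : Int :=
  if 0 ≤ n then (nat015 n.toNat : Int) else -(nat015 (-n).toNat : Int)

-- Exact model of int(n * 0.5): n/2 is an exact double for |n| ≤ 2^31, int() truncates toward zero.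
def pyHalf (n : Int) : Int := if 0 ≤ n then ((n.toNat / 2 : Nat) : Int) else -(((-n).toNat / 2 : Nat) : Int)

-- A's first for-loop (walk from the start, break when the 15% budget is reached)
def headLoopA (hb : Int) : Nat → Int → List (List (String × String)) → Nat
  | _, _, [] => 0
  | i, acc, t :: rest =>
    let acc' := acc + pvLen t
    if hb ≤ acc' then i + 1 else headLoopA hb (i + 1) acc' rest

-- A's second for-loop (walk from the end, break when the 50% budget is reached);
-- first argument of the recursion is i+1 for loop index i
def tailLoopA (turns : List (List (String × String))) (tb : Int) : Nat → Int → Int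
  | 0, _ => (turns.length : Int)
  | j + 1, acc =>
    let acc' := acc + pvLen (turns.getD j [])
    if tb ≤ acc' then (j : Int) else tailLoopA turns tb j acc'

def truncate_middle_py (turns : List (List (String × String))) (max_chars : Int) : List (List (String × String)) :=
  let total := turns.foldl (fun acc t => acc + pvLen t) 0
  if total ≤ max_chars then turns else
  let head_budget := pyInt015 max_chars
  let head_end : Int := (headLoopA head_budget 0 0 turns : Int)
  let tail_budget := pyHalf max_chars
  let tail_start : Int := tailLoopA turns tail_budget turns.length 0
  if tail_start ≤ head_end then turns else
  let omitted := tail_start - head_end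
  let marker : List (String × String) :=
    [("role", "user"), ("content", "[... " ++ PySem.Int.toStr omitted ++ " turns of iterative work omitted ...]")]
  PySem.List.slice turns none (some head_end) ++ [marker] ++ PySem.List.slice turns (some tail_start) none

-- ===== PORT B =====
-- bisect.bisect_left on a list of ints
def bisectLeft (l : List Int) (x : Int) (lo hi : Nat) : Nat :=
  if lo < hi then
    let mid := (lo + hi) / 2
    if l.getD mid 0 < x then bisectLeft l x (mid + 1) hi else bisectLeft l x lo mid
  else lo
termination_by hi - lo
decreasing_by all_goals omega

-- bisect.bisect_right on a list of ints
def bisectRight (l : List Int) (x : Int) (lo hi : Nat) : Nat :=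
  if lo < hi then
    let mid := (lo + hi) / 2
    if l.getD mid 0 ≤ x then bisectRight l x (mid + 1) hi else bisectRight l x lo mid
  else lo
termination_by hi - lo
decreasing_by all_goals omega

def truncate_middle_py_alt (turns : List (List (String × String))) (max_chars : Int) : List (List (String × String)) :=
  let pre := (turns.map pvLen).scanl (· + ·) 0   -- itertools.accumulate(lengths, initial=0)
  let total := pre.getLastD 0                    -- prefix[-1] (the prefix list is never empty)
  if total ≤ max_chars then turns else
  let head_budget := pyInt015 max_chars
  let head_end : Int := if turns = [] then 0 else ((max (bisectLeft pre head_budget 0 pre.length) 1 : Nat) : Int)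
  let tail_budget := pyHalf max_chars
  let ts0 : Int := min (((bisectRight pre (total - tail_budget) 0 pre.length : Nat) : Int) - 1) ((turns.length : Int) - 1)
  let tail_start : Int := if ts0 < 0 then (turns.length : Int) else ts0
  if tail_start ≤ head_end then turns else
  let omitted := tail_start - head_end
  let marker : List (String × String) :=
    [("role", "user"), ("content", "[... " ++ PySem.Int.toStr omitted ++ " turns of iterative work omitted ...]")]
  PySem.List.slice turns none (some head_end) ++ [marker] ++ PySem.List.slice turns (some tail_start) none

-- ===== PRECONDITION & SPEC =====
def Spec_truncate_middle_py (turns : List (List (String × String))) (max_chars : Int) (out : List (List (String × String))) : Prop := out = truncate_middle_py_alt turns max_chars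
instance (turns : List (List (String × String))) (max_chars : Int) (out : List (List (String × String))) : Decidable (Spec_truncate_middle_py turns max_chars out) := by unfold Spec_truncate_middle_py; infer_instance

-- ===== CLAIM (what is proved, stated in full; the proofs are below) =====
def Claim_equal_truncate_middle_py : Prop := ∀ (turns : List (List (String × String))) (max_chars : Int), Dom_truncate_middle_py turns max_chars → Spec_truncate_middle_py turns max_chars (truncate_middle_py turns max_chars)

-- ===== LEMMAS AND PROOFS =====

-- linear reference versions of bisect_left / bisect_right
def linL (x : Int) : List Int → Nat
  | [] => 0
  | a :: t => if x ≤ a then 0 else linL x t + 1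

def linR (x : Int) : List Int → Nat
  | [] => 0
  | a :: t => if x < a then 0 else linR x t + 1

theorem linL_le_length (x : Int) (l : List Int) : linL x l ≤ l.length := by
  induction l with
  | nil => simp [linL]
  | cons a t ih => simp only [linL, List.length_cons]; split <;> omega

theorem linR_le_length (x : Int) (l : List Int) : linR x l ≤ l.length := by
  induction l with
  | nil => simp [linR]
  | cons a t ih => simp only [linR, List.length_cons]; split <;> omega

theorem linL_lt (x : Int) (l : List Int) {i : Nat} (h : i < linL x l) : l.getD i 0 < x := by
  induction l generalizing i with
  | nil => simp [linL] at h
  | cons a t ih =>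
    by_cases hxa : x ≤ a
    · simp [linL, hxa] at h
    · simp only [linL, if_neg hxa] at h
      cases i with
      | zero => simp only [List.getD_cons_zero]; omega
      | succ j => simp only [List.getD_cons_succ]; exact ih (by omega)

theorem linR_lt (x : Int) (l : List Int) {i : Nat} (h : i < linR x l) : l.getD i 0 ≤ x := by
  induction l generalizing i with
  | nil => simp [linR] at h
  | cons a t ih =>
    by_cases hxa : x < a
    · simp [linR, hxa] at h
    · simp only [linR, if_neg hxa] at h
      cases i with
      | zero => simp only [List.getD_cons_zero]; omega
      | succ j => simp only [List.getD_cons_succ]; exact ih (by omega)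

theorem linL_ge (x : Int) (l : List Int) (h : linL x l < l.length) : x ≤ l.getD (linL x l) 0 := by
  induction l with
  | nil => simp at h
  | cons a t ih =>
    by_cases hxa : x ≤ a
    · simpa [linL, hxa] using hxa
    · simp only [linL, if_neg hxa, List.length_cons] at h ⊢
      rw [List.getD_cons_succ]
      exact ih (by omega)

theorem linR_ge (x : Int) (l : List Int) (h : linR x l < l.length) : x < l.getD (linR x l) 0 := by
  induction l with
  | nil => simp at h
  | cons a t ih =>
    by_cases hxa : x < a
    · simpa [linR, hxa] using hxa
    · simp only [linR, if_neg hxa, List.length_cons] at h ⊢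
      rw [List.getD_cons_succ]
      exact ih (by omega)

-- sorted lists: getD is monotone
theorem pairwise_getD_mono (l : List Int) (h : l.Pairwise (· ≤ ·)) {i j : Nat}
    (hij : i ≤ j) (hj : j < l.length) : l.getD i 0 ≤ l.getD j 0 := by
  rcases Nat.eq_or_lt_of_le hij with rfl | hlt
  · exact le_rfl
  · rw [List.getD_eq_getElem l 0 (by omega), List.getD_eq_getElem l 0 hj]
    exact (List.pairwise_iff_getElem.mp h) i j (by omega) hj hlt

theorem bisectLeft_eq (l : List Int) (x : Int) (hs : l.Pairwise (· ≤ ·)) :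
    ∀ (d lo hi : Nat), hi - lo ≤ d → lo ≤ linL x l → linL x l ≤ hi → hi ≤ l.length →
      bisectLeft l x lo hi = linL x l := by
  intro d
  induction d with
  | zero => intro lo hi h1 h2 h3 _; unfold bisectLeft; rw [if_neg (by omega)]; omega
  | succ d ih =>
    intro lo hi h1 h2 h3 hlen
    unfold bisectLeft
    by_cases hlh : lo < hi
    · rw [if_pos hlh]
      set mid := (lo + hi) / 2 with hmid
      by_cases hc : l.getD mid 0 < x
      · rw [if_pos hc]
        have hmr : mid + 1 ≤ linL x l := by
          by_contra hcon
          have hrm : linL x l ≤ mid := by omega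
          have hmlt : mid < l.length := by omega
          have : x ≤ l.getD mid 0 := le_trans (linL_ge x l (by omega)) (pairwise_getD_mono l hs hrm hmlt)
          omega
        exact ih (mid + 1) hi (by omega) hmr h3 hlen
      · rw [if_neg hc]
        have hrm : linL x l ≤ mid := by
          by_contra hcon
          exact hc (linL_lt x l (by omega))
        exact ih lo mid (by omega) h2 hrm (by omega)
    · rw [if_neg hlh]; omega

theorem bisectRight_eq (l : List Int) (x : Int) (hs : l.Pairwise (· ≤ ·)) :
    ∀ (d lo hi : Nat), hi - lo ≤ d → lo ≤ linR x l → linR x l ≤ hi → hi ≤ l.length →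
      bisectRight l x lo hi = linR x l := by
  intro d
  induction d with
  | zero => intro lo hi h1 h2 h3 _; unfold bisectRight; rw [if_neg (by omega)]; omega
  | succ d ih =>
    intro lo hi h1 h2 h3 hlen
    unfold bisectRight
    by_cases hlh : lo < hi
    · rw [if_pos hlh]
      set mid := (lo + hi) / 2 with hmid
      by_cases hc : l.getD mid 0 ≤ x
      · rw [if_pos hc]
        have hmr : mid + 1 ≤ linR x l := by
          by_contra hcon
          have hrm : linR x l ≤ mid := by omega
          have hmlt : mid < l.length := by omega
          have : x < l.getD mid 0 := lt_of_lt_of_le (linR_ge x l (by omega)) (pairwise_getD_mono l hs hrm hmlt)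
          omega
        exact ih (mid + 1) hi (by omega) hmr h3 hlen
      · rw [if_neg hc]
        have hrm : linR x l ≤ mid := by
          by_contra hcon
          exact hc (linR_lt x l (by omega))
        exact ih lo mid (by omega) h2 hrm (by omega)
    · rw [if_neg hlh]; omega


-- scanl facts ---------------------------------------------------------------

theorem scanl_cons_eq (b : Int) (l : List Int) :
    List.scanl (· + ·) b l = b :: (List.scanl (· + ·) b l).tail := by
  cases l <;> simp [List.scanl_nil, List.scanl_cons]

theorem scanl_getD_zero (b : Int) (l : List Int) :
    (List.scanl (· + ·) b l).getD 0 0 = b := by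
  cases l <;> simp [List.scanl_nil, List.scanl_cons]

theorem scanl_le (l : List Int) (h : ∀ a ∈ l, 0 ≤ a) :
    ∀ (b c : Int), b ≤ c → ∀ y ∈ List.scanl (· + ·) c l, b ≤ y := by
  induction l with
  | nil => intro b c hbc y hy; simp [List.scanl_nil] at hy; omega
  | cons a t ih =>
    intro b c hbc y hy
    rw [List.scanl_cons] at hy
    rcases List.mem_cons.mp hy with rfl | hy
    · exact hbc
    · exact ih (fun z hz => h z (by simp [hz])) b (c + a) (by have := h a (by simp); omega) y hy

theorem scanl_pairwise (l : List Int) (h : ∀ a ∈ l, 0 ≤ a) :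
    ∀ b, (List.scanl (· + ·) b l).Pairwise (· ≤ ·) := by
  induction l with
  | nil => intro b; simp [List.scanl_nil]
  | cons a t ih =>
    intro b
    rw [List.scanl_cons]
    refine List.Pairwise.cons ?_ (ih (fun z hz => h z (by simp [hz])) (b + a))
    intro y hy
    exact scanl_le t (fun z hz => h z (by simp [hz])) b (b + a) (by have := h a (by simp); omega) y hy

theorem getLastD_scanl_irrel (t : List Int) (c d : Int) :
    (List.scanl (· + ·) c t).getLastD d = (List.scanl (· + ·) c t).getLastD 0 := by
  cases t with
  | nil => simp [List.scanl_nil]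
  | cons u v => rw [List.scanl_cons, List.getLastD_cons, List.getLastD_cons]

theorem scanl_getLastD (l : List Int) : ∀ b : Int,
    (List.scanl (· + ·) b l).getLastD 0 = l.foldl (· + ·) b := by
  induction l with
  | nil => intro b; simp [List.scanl_nil]
  | cons a t ih =>
    intro b
    rw [List.scanl_cons, List.getLastD_cons, List.foldl_cons, getLastD_scanl_irrel, ih]

theorem scanl_getD_succ : ∀ (l : List Int) (b : Int) (j : Nat), j < l.length →
    (List.scanl (· + ·) b l).getD (j + 1) 0 = (List.scanl (· + ·) b l).getD j 0 + l.getD j 0 := by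
  intro l
  induction l with
  | nil => intro b j hj; simp at hj
  | cons a t ih =>
    intro b j hj
    cases j with
    | zero => simp [List.scanl_cons, scanl_getD_zero]
    | succ j => simpa [List.scanl_cons] using ih (b + a) j (by simpa using hj)

theorem getD_irrel (l : List Int) (i : Nat) (d d' : Int) (h : i < l.length) :
    l.getD i d = l.getD i d' := by
  rw [List.getD_eq_getElem l d h, List.getD_eq_getElem l d' h]

theorem getLastD_eq_getD (l : List Int) (d : Int) (h : l ≠ []) :
    l.getLastD d = l.getD (l.length - 1) d := by
  induction l generalizing d with
  | nil => simp at h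
  | cons a t ih =>
    cases t with
    | nil => simp
    | cons b t' =>
      rw [List.getLastD_cons, ih a (by simp)]
      simp only [List.length_cons, Nat.add_sub_cancel]
      rw [List.getD_cons_succ]
      exact getD_irrel _ _ a d (by simp)

theorem pvLen_nonneg (t : List (String × String)) : 0 ≤ pvLen t := by
  unfold pvLen
  rw [PySem.Str.len_eq]
  exact Int.natCast_nonneg _

theorem foldl_add_nonneg (l : List Int) : ∀ b : Int, (∀ a ∈ l, 0 ≤ a) → 0 ≤ b → 0 ≤ l.foldl (· + ·) b := by
  induction l with
  | nil => intro b _ hb; simpa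
  | cons a t ih =>
    intro b h hb
    simp only [List.foldl_cons]
    exact ih (b + a) (fun z hz => h z (by simp [hz])) (by have := h a (by simp); omega)

-- int(n * 0.15) bounds ------------------------------------------------------

theorem nat015_le_aux (a x L q q' : Nat) (ha : 1 ≤ a) (hb : a ≤ 2 ^ 31)
    (hx : x = a * 5404319552844595) (hL : L = Nat.log2 x)
    (hq : q = x / 2 ^ (L - 52)) (hq' : q' ≤ q + 1) : q' / 2 ^ (107 - L) ≤ a := by
  have hx0 : x ≠ 0 := by rw [hx]; positivity
  have hM : (5404319552844595 : Nat) ≤ x := by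
    rw [hx]; exact Nat.le_mul_of_pos_left _ (by omega)
  have hL52 : 52 ≤ L := by
    rw [hL]; exact (Nat.le_log2 hx0).mpr (le_trans (by norm_num) hM)
  have hxu : x < 2 ^ 84 := by
    rw [hx]
    calc a * 5404319552844595 ≤ 2 ^ 31 * 5404319552844595 := Nat.mul_le_mul_right _ hb
    _ < 2 ^ 84 := by norm_num
  have hL83 : L ≤ 83 := by rw [hL]; have := (Nat.log2_lt hx0).mpr hxu; omega
  set k := L - 52 with hkdef
  set sh := 107 - L with hshdef
  have h2k : (2 : Nat) ^ k ≤ 2 ^ 31 := Nat.pow_le_pow_right (by norm_num) (by omega)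
  have hpow : (2 : Nat) ^ sh * 2 ^ k = 2 ^ 55 := by rw [← pow_add]; congr 1; omega
  have hqx : q * 2 ^ k ≤ x := by rw [hq]; exact Nat.div_mul_le_self _ _
  have h2 : x + 2 ^ 31 < (a + 1) * 2 ^ 55 := by
    rw [hx]
    have e1 : (2 : Nat) ^ 31 = 2147483648 := by norm_num
    have e2 : (2 : Nat) ^ 55 = 36028797018963968 := by norm_num
    rw [e1, e2]
    nlinarith
  have hkey : q' * 2 ^ k < (a + 1) * (2 ^ sh * 2 ^ k) := by
    calc q' * 2 ^ k ≤ (q + 1) * 2 ^ k := Nat.mul_le_mul_right _ hq'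
    _ = q * 2 ^ k + 2 ^ k := by ring
    _ ≤ x + 2 ^ k := Nat.add_le_add_right hqx _
    _ ≤ x + 2 ^ 31 := Nat.add_le_add_left h2k _
    _ < (a + 1) * 2 ^ 55 := h2
    _ = (a + 1) * (2 ^ sh * 2 ^ k) := by rw [hpow]
  have hlt : q' < (a + 1) * 2 ^ sh :=
    Nat.lt_of_mul_lt_mul_right (by rw [mul_assoc]; exact hkey)
  have : q' / 2 ^ sh < a + 1 :=
    (Nat.div_lt_iff_lt_mul (Nat.two_pow_pos sh)).mpr (by rw [Nat.mul_comm] at hlt ⊢; omega)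
  omega

theorem nat015_le (a : Nat) (ha : 1 ≤ a) (hb : a ≤ 2 ^ 31) : nat015 a ≤ a := by
  show (let x := a * 5404319552844595
        let L := Nat.log2 x
        let k := L - 52
        let q := x / 2 ^ k
        let q' := if 2 ^ k < 2 * (x % 2 ^ k) ∨ (2 * (x % 2 ^ k) = 2 ^ k ∧ q % 2 = 1) then q + 1 else q
        q' / 2 ^ (107 - L)) ≤ a
  refine nat015_le_aux a _ _ _ _ ha hb rfl rfl rfl ?_
  split <;> omega

theorem nat015_zero : nat015 0 = 0 := by decide

theorem pyInt015_nonpos (n : Int) (h : n ≤ 0) : pyInt015 n ≤ 0 := by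
  unfold pyInt015
  split
  · have hn : n = 0 := by omega
    subst hn
    simp [nat015_zero]
  · simp

theorem pyInt015_le_self (n : Int) (h0 : 0 < n) (h31 : n ≤ 2147483648) : pyInt015 n ≤ n := by
  unfold pyInt015
  rw [if_pos (by omega)]
  have key : nat015 n.toNat ≤ n.toNat := nat015_le n.toNat (by omega) (by norm_num; omega)
  omega

-- loop bridges --------------------------------------------------------------

theorem headA_eq (hb : Int) : ∀ (ts : List (List (String × String))) (i : Nat) (acc : Int),
    headLoopA hb i acc ts =
      (if linL hb (List.scanl (· + ·) acc (ts.map pvLen)).tail < ts.length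
       then i + linL hb (List.scanl (· + ·) acc (ts.map pvLen)).tail + 1 else 0) := by
  intro ts
  induction ts with
  | nil => intro i acc; simp [headLoopA, List.scanl_nil, linL]
  | cons t rest ih =>
    intro i acc
    simp only [headLoopA, List.map_cons, List.scanl_cons, List.tail_cons, List.length_cons]
    rw [scanl_cons_eq (acc + pvLen t) (rest.map pvLen)]
    by_cases hc : hb ≤ acc + pvLen t
    · rw [if_pos hc]
      simp [linL, hc]
    · rw [if_neg hc, ih (i + 1) (acc + pvLen t)]
      simp only [linL, if_neg hc]
      split_ifs <;> omega

theorem tailA_bridge (turns : List (List (String × String))) (tb : Int) :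
    ∀ (m : Nat), m ≤ turns.length →
      tailLoopA turns tb m
          ((List.scanl (· + ·) 0 (turns.map pvLen)).getLastD 0
            - (List.scanl (· + ·) 0 (turns.map pvLen)).getD m 0) =
        (if 1 ≤ min (linR ((List.scanl (· + ·) 0 (turns.map pvLen)).getLastD 0 - tb)
                       (List.scanl (· + ·) 0 (turns.map pvLen))) m
         then ((min (linR ((List.scanl (· + ·) 0 (turns.map pvLen)).getLastD 0 - tb)
                       (List.scanl (· + ·) 0 (turns.map pvLen))) m : Nat) : Int) - 1
         else (turns.length : Int)) := by
  set P := List.scanl (· + ·) 0 (turns.map pvLen) with hP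
  set total := P.getLastD 0 with htotal
  set X := total - tb with hX
  set r := linR X P with hr
  have hplen : P.length = turns.length + 1 := by rw [hP, List.length_scanl, List.length_map]
  have hpair : P.Pairwise (· ≤ ·) := by
    rw [hP]
    exact scanl_pairwise _ (by
      intro a haa
      rcases List.mem_map.mp haa with ⟨t, _, rfl⟩
      exact pvLen_nonneg t) 0
  intro m
  induction m with
  | zero =>
    intro _
    rw [show min r 0 = 0 by omega, if_neg (by omega)]
    rfl
  | succ m ihm =>
    intro hm
    have hmP : m < (turns.map pvLen).length := by rw [List.length_map]; omega
    have hsucc : P.getD (m + 1) 0 = P.getD m 0 + (turns.map pvLen).getD m 0 := by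
      rw [hP]; exact scanl_getD_succ _ 0 m hmP
    have hlm : (turns.map pvLen).getD m 0 = pvLen (turns.getD m []) := by
      rw [List.getD_eq_getElem _ _ hmP, List.getElem_map, List.getD_eq_getElem _ _ (by omega)]
    show (let acc' := total - P.getD (m + 1) 0 + pvLen (turns.getD m [])
          if tb ≤ acc' then ((m : Nat) : Int) else tailLoopA turns tb m acc') = _
    have hacc : total - P.getD (m + 1) 0 + pvLen (turns.getD m []) = total - P.getD m 0 := by
      rw [hsucc, hlm]; ring
    rw [hacc]
    by_cases hcond : tb ≤ total - P.getD m 0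
    · rw [if_pos hcond]
      -- P[m] ≤ X, so m < r
      have hmr : m < r := by
        by_contra hcon
        have hrm : r ≤ m := by omega
        have hrlen : r < P.length := by omega
        have : X < P.getD m 0 :=
          lt_of_lt_of_le (by rw [hr] at *; exact linR_ge X P hrlen)
            (pairwise_getD_mono P hpair hrm (by omega))
        omega
      rw [if_pos (by omega)]
      have : min r (m + 1) = m + 1 := by omega
      rw [this]
      push_cast
      ring
    · rw [if_neg hcond]
      have hrm : r ≤ m := by
        by_contra hcon
        have : P.getD m 0 ≤ X := by rw [hr] at hcon; exact linR_lt X P (by omega)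
        omega
      rw [ihm (by omega), show min r m = min r (m + 1) by omega]

-- ===== VERDICT (by name: the statement is the Claim_ definition above) =====
theorem truncate_middle_py_spec : Claim_equal_truncate_middle_py := by
  intro turns mc hdom
  have hmcb : -2147483648 ≤ mc ∧ mc ≤ 2147483648 := by
    unfold Dom_truncate_middle_py pvDomInt at hdom
    simp only [Bool.and_eq_true, decide_eq_true_eq] at hdom
    exact hdom.2
  unfold Spec_truncate_middle_py truncate_middle_py truncate_middle_py_alt
  dsimp only
  set lens := turns.map pvLen with hlens
  set P := List.scanl (· + ·) 0 lens with hP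
  set totB := P.getLastD 0 with htB
  set totA := turns.foldl (fun acc t => acc + pvLen t) 0 with htA
  have htot : totA = totB := by
    rw [htA, htB, hP, scanl_getLastD, hlens, List.foldl_map]
  rw [← htot]
  by_cases hle : totA ≤ mc
  · rw [if_pos hle, if_pos hle]
  · rw [if_neg hle, if_neg hle]
    set hb := pyInt015 mc with hhbdef
    set tb := pyHalf mc with htbdef
    have hnn : ∀ a ∈ lens, 0 ≤ a := by
      intro a haa
      rcases List.mem_map.mp (hlens ▸ haa) with ⟨t, _, rfl⟩
      exact pvLen_nonneg t
    have hpair : P.Pairwise (· ≤ ·) := by rw [hP]; exact scanl_pairwise _ hnn 0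
    have hplen : P.length = turns.length + 1 := by
      rw [hP, List.length_scanl, hlens, List.length_map]
    have hgl : P.getLastD 0 = totA := (htot.trans htB).symm
    have hPne : P ≠ [] := by
      rw [hP, scanl_cons_eq]; exact List.cons_ne_nil _ _
    have hPn : P.getD turns.length 0 = totA := by
      rw [← hgl, getLastD_eq_getD P 0 hPne, hplen]
      simp
    have h0tot : 0 ≤ totA := by
      have : totA = lens.foldl (· + ·) 0 := by rw [htA, hlens, List.foldl_map]
      rw [this]
      exact foldl_add_nonneg lens 0 hnn le_rfl
    have hhb : hb ≤ totA := by
      by_cases hpos : 0 < mc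
      · exact le_trans (pyInt015_le_self mc hpos hmcb.2) (by omega)
      · exact le_trans (pyInt015_nonpos mc (by omega)) h0tot
    have hcons : P = 0 :: P.tail := by rw [hP]; exact scanl_cons_eq 0 lens
    have hTlen : P.tail.length = turns.length := by
      have := hplen
      rw [hcons] at this
      simpa using this
    -- head ends agree
    have hE : ((headLoopA hb 0 0 turns : Nat) : Int) =
        (if turns = [] then 0 else ((max (bisectLeft P hb 0 P.length) 1 : Nat) : Int)) := by
      by_cases hne : turns = []
      · subst hne; simp [headLoopA]
      · rw [if_neg hne]
        have hn1 : 1 ≤ turns.length := by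
          cases turns with
          | nil => exact absurd rfl hne
          | cons a t => simp
        have hbl : bisectLeft P hb 0 P.length = linL hb P :=
          bisectLeft_eq P hb hpair P.length 0 P.length (by omega) (Nat.zero_le _)
            (linL_le_length hb P) le_rfl
        rw [hbl]
        have hA := headA_eq hb turns 0 0
        rw [← hlens, ← hP] at hA
        rw [hA]
        have hPtail : P.getD turns.length 0 = P.tail.getD (turns.length - 1) 0 := by
          conv_lhs => rw [hcons]
          rw [show turns.length = (turns.length - 1) + 1 by omega, List.getD_cons_succ]
          simp
        by_cases hb0 : hb ≤ 0
        · have hP1 : hb ≤ P.getD 1 0 := by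
            have h01 : P.getD 0 0 ≤ P.getD 1 0 :=
              pairwise_getD_mono P hpair (by omega) (by omega)
            have h00 : P.getD 0 0 = 0 := by rw [hP]; exact scanl_getD_zero 0 lens
            omega
          have hT0 : hb ≤ P.tail.getD 0 0 := by
            have : P.getD 1 0 = P.tail.getD 0 0 := by
              conv_lhs => rw [hcons]
              rfl
            omega
          have hlt : linL hb P.tail = 0 := by
            by_contra hcon
            have := linL_lt hb P.tail (show 0 < linL hb P.tail by omega)
            omega
          have hlp : linL hb P = 0 := by
            by_contra hcon
            have := linL_lt hb P (show 0 < linL hb P by omega)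
            have h00 : P.getD 0 0 = 0 := by rw [hP]; exact scanl_getD_zero 0 lens
            omega
          rw [hlt, hlp]
          rw [if_pos (by omega)]
          simp
        · have hlPT : linL hb P = linL hb P.tail + 1 := by
            conv_lhs => rw [hcons]
            simp [linL, hb0]
          have hrlt : linL hb P.tail < turns.length := by
            by_contra hcon
            have hle' : linL hb P.tail ≤ P.tail.length := linL_le_length hb P.tail
            have heq : turns.length - 1 < linL hb P.tail := by omega
            have := linL_lt hb P.tail heq
            omega
          rw [if_pos hrlt, hlPT]
          have : max (linL hb P.tail + 1) 1 = linL hb P.tail + 1 := by omega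
          rw [this]
          push_cast
          ring
    -- tail starts agree
    have hbr : bisectRight P (totA - tb) 0 P.length = linR (totA - tb) P :=
      bisectRight_eq P (totA - tb) hpair P.length 0 P.length (by omega) (Nat.zero_le _)
        (linR_le_length _ P) le_rfl
    have hbridge := tailA_bridge turns tb turns.length le_rfl
    rw [← hlens, ← hP, hgl, hPn, sub_self] at hbridge
    have tE : tailLoopA turns tb turns.length 0 =
        (if min (((bisectRight P (totA - tb) 0 P.length : Nat) : Int) - 1)
              ((turns.length : Int) - 1) < 0
         then (turns.length : Int)
         else min (((bisectRight P (totA - tb) 0 P.length : Nat) : Int) - 1)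
              ((turns.length : Int) - 1)) := by
      rw [hbridge, hbr]
      have hrb : linR (totA - tb) P ≤ turns.length + 1 := by
        have := linR_le_length (totA - tb) P
        omega
      split_ifs <;> push_cast <;> omega
    rw [hE, tE]
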